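-- pv_equiv track=rewrite | github.com/echoloop96/Informational-Genomics | ProgettoModelli.py | get_duplexes
-- ===== SOURCE A (Python) =====
-- def get_kmers(Seq, k):
--
--     ''' Returns the set of k-mers that occur in a given sequence
--         ----------
--         Paramaters:
--             Seq(Bio.Seq)
--             K(int)
--         Returns:
--             set(str)
--     '''
--
--     kmers = set()
--     for i in range(len(Seq) - k +1):
--         kmers.add(str(Seq[i:i+k]))
--     return kmers
--
-- def count_occurrences(Seq,w):
--
--     '''
--         Counts the number of occurences of w in Seq
--         --------
--         Parameters:
--             Seq (Bio.Seq)
--             w (str)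
--         Returns:
--             int : number of w in Seq
--     '''
--
--     count = 0
--     for i in range(len(Seq) -len(w) +1):
--         for j in range(len(w)):
--             if Seq[i+j] != w[j]:
--                 break
--         else:
--             count += 1
--     return count
--
-- def get_duplexes(Seq,k):
--     '''
--        Returns a list of duplexes in a Seq
--        ----------
--        Parameters:
--            Seq(Bio.Seq)
--            k(int)
--         --------
--         Returns:
--         sorted(list[str]) : duplexes
--     '''
--     kmers = get_kmers(Seq,k)
--     duplexes = []
--     for kmer in kmers:
--         m = count_occurrences(Seq,kmer)
--         if m==2:
--             duplexes.append(kmer)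
--     return sorted(duplexes)
-- ===== SOURCE B (Python) =====
-- from itertools import groupby
--
-- def get_duplexes(Seq, k):
--     kmers = sorted(str(Seq[i:i+k]) for i in range(len(Seq) - k + 1))
--     return [w for w, run in groupby(kmers) if sum(1 for _ in run) == 2]
-- ===== Notes on version B (the rewrite author's own statement) =====
-- stated objective: faster
-- what changed: A rescans the whole sequence with a nested character loop for every distinct k-mer; B collects all k-mer slices once, sorts them, and keeps the keys of runs of length exactly 2 in one groupby pass (already sorted, no final sort).
-- outside the precondition, e.g. on get_duplexes('a', -1): A returns [''], B returns []
import Mathlib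
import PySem

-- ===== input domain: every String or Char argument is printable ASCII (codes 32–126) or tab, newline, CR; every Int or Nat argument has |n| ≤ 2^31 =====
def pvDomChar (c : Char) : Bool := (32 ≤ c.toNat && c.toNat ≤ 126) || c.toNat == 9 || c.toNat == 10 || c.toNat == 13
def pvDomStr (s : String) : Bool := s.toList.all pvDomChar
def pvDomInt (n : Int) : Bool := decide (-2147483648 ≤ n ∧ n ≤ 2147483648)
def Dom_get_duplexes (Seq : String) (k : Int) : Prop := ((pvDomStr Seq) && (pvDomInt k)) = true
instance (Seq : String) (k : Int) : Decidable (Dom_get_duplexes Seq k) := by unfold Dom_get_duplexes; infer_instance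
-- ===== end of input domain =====

-- B replaces A's per-kmer rescan of the sequence by one sort of all k-mer slices plus a single
-- run-grouping pass (itertools.groupby), keeping the keys whose run length is exactly 2.

-- ===== PORT A =====
-- get_kmers(Seq, k): the set of slices Seq[i:i+k] for i in range(len(Seq)-k+1)
def get_kmers (Seq : String) (k : Int) : PySem.Set String :=
  (PySem.List.pyRange 0 (PySem.Str.len Seq - k + 1)).foldl
    (fun kmers i => PySem.Set.add kmers (PySem.Str.slice Seq (some i) (some (i + k))))
    PySem.Set.empty

-- the inner 'for j in range(len(w)): if Seq[i+j] != w[j]: break' loop with its 'else:';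
-- true = no break. pyGet? = none is Python's IndexError; it cannot occur on the index
-- ranges count_occurrences feeds in (the catch-all match arm only keeps the port total).
def pvNoBreak (Seq w : String) (i : Int) : List Int → Bool
  | [] => true
  | j :: js =>
    match PySem.Str.pyGet? Seq (i + j), PySem.Str.pyGet? w j with
    | some a, some b => if a ≠ b then false else pvNoBreak Seq w i js
    | _, _ => false

def count_occurrences (Seq w : String) : Int :=
  (PySem.List.pyRange 0 (PySem.Str.len Seq - PySem.Str.len w + 1)).foldl
    (fun count i =>
      if pvNoBreak Seq w i (PySem.List.pyRange 0 (PySem.Str.len w)) then count + 1 else count)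
    0

def get_duplexes (Seq : String) (k : Int) : List String :=
  let kmers := get_kmers Seq k
  let duplexes := kmers.foldl
    (fun duplexes kmer =>
      if count_occurrences Seq kmer = 2 then duplexes ++ [kmer] else duplexes) []
  PySem.List.sorted duplexes (fun x => x)

-- ===== PORT B =====
-- itertools.groupby on a sorted list: peel off the maximal run of the head key,
-- keep the key iff the run length is exactly 2.
def pvRuns : List String → List String
  | [] => []
  | x :: rest =>
    let run := rest.takeWhile (fun y => y == x)
    let rest' := rest.dropWhile (fun y => y == x)
    if run.length + 1 = 2 then x :: pvRuns rest' else pvRuns rest'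
termination_by s => s.length
decreasing_by
  all_goals
    have := List.length_dropWhile_le (fun y => y == x) rest
    simp only [List.length_cons]
    omega

def get_duplexes_alt (Seq : String) (k : Int) : List String :=
  pvRuns (PySem.List.sorted
    ((PySem.List.pyRange 0 (PySem.Str.len Seq - k + 1)).map
      (fun i => PySem.Str.slice Seq (some i) (some (i + k))))
    (fun x => x))

-- ===== PRECONDITION & SPEC =====
-- Pre_ excludes only negative k, a degenerate corner on which "k-mer" is undefined: there A's
-- value is an accident of Python's negative-slice wraparound inside get_kmers (count_occurrences
-- meanwhile scans by the slice's length), and B's raw slice-multiset count is another accident;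
-- neither behaviour is specified or useful.
def Pre_get_duplexes (Seq : String) (k : Int) : Prop := 0 ≤ k
instance (Seq : String) (k : Int) : Decidable (Pre_get_duplexes Seq k) := by
  unfold Pre_get_duplexes; infer_instance

def pvWitness_get_duplexes : String × Int := ("abab", 2)

def Spec_get_duplexes (Seq : String) (k : Int) (out : List String) : Prop := out = get_duplexes_alt Seq k
instance (Seq : String) (k : Int) (out : List String) : Decidable (Spec_get_duplexes Seq k out) := by unfold Spec_get_duplexes; infer_instance

-- ===== CLAIM (what is proved, stated in full; the proofs are below) =====
def Claim_equal_get_duplexes : Prop := ∀ (Seq : String) (k : Int), Dom_get_duplexes Seq k → Pre_get_duplexes Seq k → Spec_get_duplexes Seq k (get_duplexes Seq k)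

-- ===== LEMMAS AND PROOFS =====

-- the list of all k-mer slices, in position order (shared vocabulary of the proofs)
def pvSlices (Seq : String) (k : Int) : List String :=
  (PySem.List.pyRange 0 (PySem.Str.len Seq - k + 1)).map
    (fun i => PySem.Str.slice Seq (some i) (some (i + k)))

lemma get_kmers_eq_ofList (Seq : String) (k : Int) :
    get_kmers Seq k = PySem.Set.ofList (pvSlices Seq k) := by
  rw [get_kmers, pvSlices, PySem.Set.ofList_eq_foldl, List.foldl_map]
  rfl

-- the char-by-char inner loop from index j on agrees with slice equality from index j on
lemma pvNoBreak_iff (Seq w : String) (i : Int) (hi : 0 ≤ i)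
    (hle : i.toNat + w.toList.length ≤ Seq.toList.length) :
    ∀ (m j : Nat), j + m = w.toList.length →
      ((pvNoBreak Seq w i (PySem.List.pyRange (j : Int) (PySem.Str.len w)) = true)
        ↔ (Seq.toList.drop (i.toNat + j)).take m = w.toList.drop j) := by
  intro m
  induction m with
  | zero =>
    intro j hj
    have hr : PySem.List.pyRange (j : Int) (PySem.Str.len w) = [] := by
      have : ∀ x, x ∉ PySem.List.pyRange (j : Int) (PySem.Str.len w) := by
        intro x hx
        rw [PySem.List.mem_pyRange_one] at hx
        rw [PySem.Str.len_eq] at hx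
        omega
      exact List.eq_nil_iff_forall_not_mem.mpr this
    rw [hr]
    simp [pvNoBreak, List.drop_of_length_le (by omega : w.toList.length ≤ j)]
  | succ m ih =>
    intro j hj
    have hjlt : j < w.toList.length := by omega
    have hcons : PySem.List.pyRange (j : Int) (PySem.Str.len w) =
        (j : Int) :: PySem.List.pyRange ((j : Int) + 1) (PySem.Str.len w) := by
      apply PySem.List.pyRange_one_cons
      rw [PySem.Str.len_eq]; exact_mod_cast hjlt
    rw [hcons]
    have hij : i + (j : Int) = ((i.toNat + j : Nat) : Int) := by omega
    have hslt : i.toNat + j < Seq.toList.length := by omega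
    have hgs : PySem.Str.pyGet? Seq (i + (j : Int)) = some (Seq.toList[i.toNat + j]) := by
      rw [hij, PySem.Str.pyGet?_natCast, List.getElem?_eq_getElem hslt]
    have hgw : PySem.Str.pyGet? w (j : Int) = some (w.toList[j]) := by
      rw [PySem.Str.pyGet?_natCast, List.getElem?_eq_getElem hjlt]
    have hdS : Seq.toList.drop (i.toNat + j)
        = Seq.toList[i.toNat + j] :: Seq.toList.drop (i.toNat + j + 1) :=
      List.drop_eq_getElem_cons hslt
    have hdw : w.toList.drop j = w.toList[j] :: w.toList.drop (j + 1) :=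
      List.drop_eq_getElem_cons hjlt
    rw [pvNoBreak, hgs, hgw, hdS, hdw, List.take_succ_cons]
    show (if Seq.toList[i.toNat + j] ≠ w.toList[j] then false
          else pvNoBreak Seq w i (PySem.List.pyRange ((j : Int) + 1) (PySem.Str.len w))) = true ↔ _
    by_cases hc : Seq.toList[i.toNat + j] = w.toList[j]
    · rw [if_neg (by simp [hc])]
      have hrec := ih (j + 1) (by omega)
      push_cast at hrec
      rw [show i.toNat + j + 1 = i.toNat + (j + 1) from by omega, hrec]
      constructor
      · intro h; rw [hc, h]
      · intro h; exact (List.cons_eq_cons.mp h).2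
    · rw [if_pos hc]
      simp only [Bool.false_eq_true, false_iff]
      intro h; exact hc (List.cons_eq_cons.mp h).1

-- every slice in pvSlices (k ≥ 0) is the length-k window at some admissible offset
lemma mem_pvSlices (Seq : String) (k : Int) (hk : 0 ≤ k) (w : String) :
    w ∈ pvSlices Seq k →
      ∃ i : Nat, i + k.toNat ≤ Seq.toList.length ∧
        w.toList = (Seq.toList.drop i).take k.toNat ∧ w.toList.length = k.toNat := by
  intro hw
  rw [pvSlices, List.mem_map] at hw
  obtain ⟨i0, hi0, hs⟩ := hw
  rw [PySem.List.mem_pyRange_one, PySem.Str.len_eq] at hi0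
  refine ⟨i0.toNat, by omega, ?_, ?_⟩
  · rw [← hs, PySem.Str.toList_slice, PySem.Chars.slice_eq_listSlice,
      PySem.List.slice_toNat _ hi0.1 (by omega)]
    congr 1
    omega
  · rw [← hs, PySem.Str.toList_slice, PySem.Chars.slice_eq_listSlice,
      PySem.List.slice_toNat _ hi0.1 (by omega)]
    rw [List.length_take, List.length_drop]
    omega

-- A's nested-loop occurrence count of a k-mer is its multiplicity in the slice list
lemma count_occ_eq_count (Seq : String) (k : Int) (hk : 0 ≤ k) (w : String)
    (hwlen : w.toList.length = k.toNat) :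
    count_occurrences Seq w = ((pvSlices Seq k).count w : Int) := by
  have hlenw : PySem.Str.len w = k := by rw [PySem.Str.len_eq, hwlen]; omega
  rw [count_occurrences, hlenw, pvSlices, PySem.List.foldl_count_if, zero_add,
    List.count_eq_countP, List.countP_map]
  congr 1
  apply List.countP_congr
  intro i hi
  rw [PySem.List.mem_pyRange_one, PySem.Str.len_eq] at hi
  have h1 : i.toNat + w.toList.length ≤ Seq.toList.length := by omega
  have h2 := pvNoBreak_iff Seq w i hi.1 h1 w.toList.length 0 (by omega)
  rw [Nat.cast_zero] at h2
  simp only [Nat.add_zero, List.drop_zero] at h2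
  rw [hlenw] at h2
  rw [h2]
  have hsl : (PySem.Str.slice Seq (some i) (some (i + k))).toList
      = (Seq.toList.drop i.toNat).take k.toNat := by
    rw [PySem.Str.toList_slice, PySem.Chars.slice_eq_listSlice,
      PySem.List.slice_toNat _ hi.1 (by omega)]
    congr 1
    omega
  constructor
  · intro h
    simp only [Function.comp_apply, beq_iff_eq]
    apply String.toList_inj.mp
    rw [hsl, ← hwlen, h]
  · intro h
    simp only [Function.comp_apply, beq_iff_eq] at h
    rw [← h, hsl, List.length_take, List.length_drop]
    have hmin : min k.toNat (Seq.toList.length - i.toNat) = k.toNat := by omega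
    rw [hmin]

lemma mem_pvRuns_sub (w : String) : ∀ t : List String, w ∈ pvRuns t → w ∈ t := by
  intro t
  fun_induction pvRuns t with
  | case1 => intro h; exact absurd h (List.not_mem_nil)
  | case2 x rest run rest' hif ih =>
    intro h
    rcases List.mem_cons.mp h with h | h
    · exact h ▸ List.mem_cons_self
    · exact List.mem_cons_of_mem _ ((List.dropWhile_sublist _).mem (ih h))
  | case3 x rest run rest' hif ih =>
    intro h
    exact List.mem_cons_of_mem _ ((List.dropWhile_sublist _).mem (ih h))

-- structural facts about one run step on a (≤)-sorted list
lemma run_facts (x : String) (rest : List String) (hp : (x :: rest).Pairwise (· ≤ ·)) :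
    (∀ y ∈ rest.dropWhile (fun y => y == x), x < y) ∧
    (x :: rest).count x = (rest.takeWhile (fun y => y == x)).length + 1 ∧
    (∀ w, w ≠ x → (x :: rest).count w = (rest.dropWhile (fun y => y == x)).count w) ∧
    (rest.dropWhile (fun y => y == x)).Pairwise (· ≤ ·) := by
  have hx : ∀ y ∈ rest, x ≤ y := fun y hy => (List.pairwise_cons.mp hp).1 y hy
  have hrest : rest.Pairwise (· ≤ ·) := (List.pairwise_cons.mp hp).2
  have hrest' : (rest.dropWhile (fun y => y == x)).Pairwise (· ≤ ·) :=
    hrest.sublist (List.dropWhile_sublist _)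
  have hlt : ∀ y ∈ rest.dropWhile (fun y => y == x), x < y := by
    intro y hy
    cases hd : rest.dropWhile (fun y => y == x) with
    | nil => rw [hd] at hy; exact absurd hy (List.not_mem_nil)
    | cons h t =>
      have hhne : ¬(h == x) = true := by
        have := List.head?_dropWhile_not (fun y => y == x) rest
        rw [hd] at this
        simpa using this
      have hhx : x < h := by
        have hhmem : h ∈ rest := (List.dropWhile_sublist _).mem (hd ▸ List.mem_cons_self)
        exact lt_of_le_of_ne (hx h hhmem) (fun e => hhne (by simp [e.symm]))
      rw [hd] at hy
      rcases List.mem_cons.mp hy with rfl | hy'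
      · exact hhx
      · have : h ≤ y := by
          have := (List.pairwise_cons.mp (hd ▸ hrest')).1
          exact this y hy'
        exact lt_of_lt_of_le hhx this
  refine ⟨hlt, ?_, ?_, hrest'⟩
  · have hsplit := List.takeWhile_append_dropWhile (p := fun y => y == x) (l := rest)
    have hrun : ∀ y ∈ rest.takeWhile (fun y => y == x), y = x := by
      intro y hy
      have := List.mem_takeWhile_imp hy
      simpa using this
    rw [List.count_cons_self]
    conv_lhs => rw [← hsplit]
    rw [List.count_append]
    have h1 : (rest.takeWhile (fun y => y == x)).count x
        = (rest.takeWhile (fun y => y == x)).length := by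
      apply List.count_eq_length.mpr
      intro y hy; exact (hrun y hy).symm ▸ rfl
    have h2 : (rest.dropWhile (fun y => y == x)).count x = 0 := by
      apply List.count_eq_zero.mpr
      intro hmem
      exact absurd rfl (ne_of_gt (hlt x hmem))
    omega
  · intro w hw
    have hsplit := List.takeWhile_append_dropWhile (p := fun y => y == x) (l := rest)
    have hrun : ∀ y ∈ rest.takeWhile (fun y => y == x), y = x := by
      intro y hy
      have := List.mem_takeWhile_imp hy
      simpa using this
    rw [List.count_cons]
    simp only [beq_iff_eq]
    rw [if_neg (Ne.symm hw), add_zero]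
    conv_lhs => rw [← hsplit]
    rw [List.count_append]
    have h1 : (rest.takeWhile (fun y => y == x)).count w = 0 := by
      apply List.count_eq_zero.mpr
      intro hmem
      exact hw (hrun w hmem)
    omega

-- on a (≤)-sorted list, pvRuns keeps exactly the keys of multiplicity 2
lemma pvRuns_spec (w : String) :
    ∀ t : List String, t.Pairwise (· ≤ ·) → (w ∈ pvRuns t ↔ t.count w = 2) := by
  intro t
  fun_induction pvRuns t with
  | case1 => intro _; simp
  | case2 x rest run rest' hif ih =>
    intro hp
    obtain ⟨hlt, hcx, hcw, hp'⟩ := run_facts x rest hp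
    rw [List.mem_cons, ih hp']
    have h0 : rest'.count x = 0 := List.count_eq_zero.mpr
      (fun hmem => absurd rfl (ne_of_gt (hlt x hmem)))
    constructor
    · rintro (rfl | hcnt)
      · rw [hcx]; exact hif
      · by_cases hwx : w = x
        · rw [hwx] at hcnt; rw [h0] at hcnt; omega
        · rw [hcw w hwx]; exact hcnt
    · intro h2
      by_cases hwx : w = x
      · left; exact hwx
      · right; rw [← hcw w hwx]; exact h2
  | case3 x rest run rest' hif ih =>
    intro hp
    obtain ⟨hlt, hcx, hcw, hp'⟩ := run_facts x rest hp
    rw [ih hp']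
    by_cases hwx : w = x
    · have h0 : rest'.count x = 0 := List.count_eq_zero.mpr
        (fun hmem => absurd rfl (ne_of_gt (hlt x hmem)))
      rw [hwx, h0, hcx]
      constructor
      · intro h; omega
      · intro h; exact absurd h hif
    · rw [hcw w hwx]

lemma pvRuns_pairwise :
    ∀ t : List String, t.Pairwise (· ≤ ·) → (pvRuns t).Pairwise (· < ·) := by
  intro t
  fun_induction pvRuns t with
  | case1 => intro _; simp
  | case2 x rest run rest' hif ih =>
    intro hp
    obtain ⟨hlt, _, _, hp'⟩ := run_facts x rest hp
    refine List.pairwise_cons.mpr ⟨?_, ih hp'⟩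
    intro y hy
    exact hlt y (mem_pvRuns_sub y rest' hy)
  | case3 x rest run rest' hif ih =>
    intro hp
    obtain ⟨_, _, _, hp'⟩ := run_facts x rest hp
    exact ih hp'

-- ===== VERDICT (by name: the statement is the Claim_ definition above) =====
theorem get_duplexes_spec : Claim_equal_get_duplexes := by
  intro Seq k _ hpre
  have hk : 0 ≤ k := hpre
  unfold Spec_get_duplexes
  have hfold : (PySem.Set.ofList (pvSlices Seq k)).foldl
      (fun duplexes kmer =>
        if count_occurrences Seq kmer = 2 then duplexes ++ [kmer] else duplexes) []
      = (PySem.Set.ofList (pvSlices Seq k)).filter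
          (fun w => decide (count_occurrences Seq w = 2)) := by
    have := PySem.List.foldl_append_if
      (p := fun w => decide (count_occurrences Seq w = 2)) (f := fun w => w)
      (l := PySem.Set.ofList (pvSlices Seq k)) (acc := [])
    simpa using this
  rw [get_duplexes, get_duplexes_alt, get_kmers_eq_ofList, hfold]
  change _ = pvRuns (PySem.List.sorted (pvSlices Seq k) (fun x => x))
  have hpwL : (PySem.List.sorted (pvSlices Seq k) (fun x => x)).Pairwise (· ≤ ·) :=
    PySem.List.sorted_pairwise (pvSlices Seq k) (fun x => x)
  have hpairlt := pvRuns_pairwise _ hpwL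
  apply PySem.List.sorted_eq_of_perm_of_pairwise_lt
  · have hnd1 : (pvRuns (PySem.List.sorted (pvSlices Seq k) (fun x => x))).Nodup :=
      hpairlt.imp ne_of_lt
    rw [List.perm_ext_iff_of_nodup hnd1
      (List.Nodup.filter _ (PySem.Set.nodup_ofList (pvSlices Seq k)))]
    intro w
    rw [pvRuns_spec w _ hpwL,
      (PySem.List.sorted_perm (pvSlices Seq k) (fun x => x) false).count_eq,
      List.mem_filter, PySem.Set.mem_ofList]
    constructor
    · intro h2
      have hmem : w ∈ pvSlices Seq k := List.count_pos_iff.mp (by omega)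
      obtain ⟨i, _, _, hwlen⟩ := mem_pvSlices Seq k hk w hmem
      refine ⟨hmem, ?_⟩
      simp only [decide_eq_true_eq]
      rw [count_occ_eq_count Seq k hk w hwlen, h2]
      rfl
    · rintro ⟨hmem, hp⟩
      simp only [decide_eq_true_eq] at hp
      obtain ⟨i, _, _, hwlen⟩ := mem_pvSlices Seq k hk w hmem
      rw [count_occ_eq_count Seq k hk w hwlen] at hp
      exact_mod_cast hp
  · exact hpairlt
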